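-- pv_equiv track=rewrite | github.com/byewind1/openbrep | openbrep/gdl_previewer.py | _logical_lines
-- ===== SOURCE A (Python) =====
-- def _logical_lines(script: str) -> list[tuple[int, str]]:
--     """Convert physical lines to logical lines (simple comma continuation)."""
--     out: list[tuple[int, str]] = []
--     buf = ""
--     start_line = 0
--
--     for line_no, raw in enumerate((script or "").splitlines(), start=1):
--         code = raw.split("!", 1)[0].strip()
--         if not code:
--             continue
--
--         if buf:
--             buf += " " + code
--         else:
--             buf = code
--             start_line = line_no
--
--         if code.endswith(","):
--             continue
--
--         out.append((start_line, buf.strip()))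
--         buf = ""
--
--     if buf:
--         out.append((start_line, buf.strip()))
--
--     return out
-- ===== SOURCE B (Python) =====
-- def _logical_lines(script: str) -> list[tuple[int, str]]:
--     """Convert physical lines to logical lines (simple comma continuation)."""
--     # Pass 1: materialize the cleaned (line_no, code) list of non-blank lines.
--     cleaned = [
--         (line_no, code)
--         for line_no, raw in enumerate((script or "").splitlines(), start=1)
--         if (code := raw.split("!", 1)[0].strip())
--     ]
--     # Pass 2: repeatedly measure the leading comma-continuation run and slice
--     # off a whole logical group at once (no per-line buffer / state machine).
--     out: list[tuple[int, str]] = []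
--     while cleaned:
--         n = 1
--         while n < len(cleaned) and cleaned[n - 1][1].endswith(","):
--             n += 1
--         head, cleaned = cleaned[:n], cleaned[n:]
--         out.append((head[0][0], " ".join(code for _, code in head)))
--     return out
-- ===== Notes on version B (the rewrite author's own statement) =====
-- stated objective: alternative
-- what changed: B first materializes the cleaned (line_no, code) list, then instead of A's per-line state machine with a growing buffer it repeatedly measures the length of the leading comma-continuation run and slices off a whole logical group at once, joining the group's codes on emit.
import Mathlib
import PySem

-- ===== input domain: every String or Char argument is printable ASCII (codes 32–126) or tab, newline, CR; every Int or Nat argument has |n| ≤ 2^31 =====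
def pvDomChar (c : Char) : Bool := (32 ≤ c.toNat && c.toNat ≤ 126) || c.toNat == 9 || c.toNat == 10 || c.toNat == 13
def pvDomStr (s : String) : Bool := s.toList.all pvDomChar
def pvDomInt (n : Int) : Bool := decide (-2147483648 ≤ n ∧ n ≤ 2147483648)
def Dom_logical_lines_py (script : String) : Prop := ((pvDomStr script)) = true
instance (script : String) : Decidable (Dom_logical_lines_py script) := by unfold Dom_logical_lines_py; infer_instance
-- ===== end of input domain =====

-- B replaces A's per-line state machine (buffer + start_line) by two stages: materialize the
-- cleaned (line_no, code) list, then repeatedly slice off a whole comma-continuation run as one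
-- group, joining on emit (objective: alternative decomposition, same cost).

-- ===== PORT A =====
-- code = raw.split("!", 1)[0].strip()   (split with sep "!" always yields a non-empty list,
-- so the defaults of getD/headD are unreachable)
def pyCleanCode (raw : List Char) : List Char :=
  PySem.Chars.strip (((PySem.Chars.splitMax? raw ['!'] 1).getD [raw]).headD raw)

-- loop body of A, state = (out, buf, start_line)
def stepA (st : List (Int × String) × List Char × Int) (p : Int × List Char) :
    List (Int × String) × List Char × Int :=
  let code := pyCleanCode p.2
  if code = [] then st
  else
    let bs : List Char × Int :=
      if st.2.1 = [] then (code, p.1) else (st.2.1 ++ ' ' :: code, st.2.2)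
    if PySem.Chars.endswith code [','] then (st.1, bs.1, bs.2)
    else (st.1 ++ [(bs.2, String.ofList (PySem.Chars.strip bs.1))], [], bs.2)

def logical_lines_py (script : String) : List (Int × String) :=
  let s := if script = "" then "" else script   -- (script or "")
  let st := (PySem.List.enumerate (PySem.Chars.splitlines s.toList) 1).foldl stepA ([], [], 0)
  if st.2.1 = [] then st.1
  else st.1 ++ [(st.2.2, String.ofList (PySem.Chars.strip st.2.1))]

-- ===== PORT B =====
-- pass 1 entry of B: keep (line_no, code) when code is non-empty
def cleanEntry? (p : Int × List Char) : Option (Int × List Char) :=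
  let code := pyCleanCode p.2
  if code = [] then none else some (p.1, code)

-- inner while of B: n = 1; while n < len(cleaned) and cleaned[n-1][1].endswith(","): n += 1
-- (the index n-1 is always in range since n < length is checked first, so getD's default is unreachable)
def groupLenGo (l : List (Int × List Char)) (n : Nat) : Nat :=
  if n < l.length ∧ PySem.Chars.endswith ((l.getD (n - 1) (0, [])).2) [','] = true
  then groupLenGo l (n + 1) else n
termination_by l.length - n
decreasing_by omega

-- needed for loopB's termination (n ≥ 1): the while loop only increases n
theorem groupLenGo_ge (l : List (Int × List Char)) (n : Nat) : n ≤ groupLenGo l n := by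
  unfold groupLenGo
  split
  · have := groupLenGo_ge l (n + 1); omega
  · exact le_refl n
termination_by l.length - n
decreasing_by rename_i h; omega

-- outer while of B: slice off one group of n entries, emit (head[0][0], " ".join(codes))
def loopB : List (Int × List Char) → List (Int × String)
  | [] => []
  | p :: t =>
    let n := groupLenGo (p :: t) 1
    (p.1, String.ofList (PySem.Chars.join [' '] (((p :: t).take n).map Prod.snd))) ::
      loopB ((p :: t).drop n)
termination_by l => l.length
decreasing_by
  simp only [List.length_drop]
  have := groupLenGo_ge (p :: t) 1
  simp; omega

def logical_lines_py_alt (script : String) : List (Int × String) :=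
  let s := if script = "" then "" else script   -- (script or "")
  let cleaned :=
    (PySem.List.enumerate (PySem.Chars.splitlines s.toList) 1).filterMap cleanEntry?
  loopB cleaned

-- ===== PRECONDITION & SPEC =====
def Spec_logical_lines_py (script : String) (out : List (Int × String)) : Prop := out = logical_lines_py_alt script
instance (script : String) (out : List (Int × String)) : Decidable (Spec_logical_lines_py script out) := by unfold Spec_logical_lines_py; infer_instance

-- ===== CLAIM (what is proved, stated in full; the proofs are below) =====
def Claim_equal_logical_lines_py : Prop := ∀ (script : String), Dom_logical_lines_py script → Spec_logical_lines_py script (logical_lines_py script)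

-- ===== LEMMAS AND PROOFS =====

-- A's loop body with the code already cleaned (stepA st p = stepA' st (p.1, pyCleanCode p.2))
def stepA' (st : List (Int × String) × List Char × Int) (q : Int × List Char) :
    List (Int × String) × List Char × Int :=
  if q.2 = [] then st
  else
    let bs : List Char × Int :=
      if st.2.1 = [] then (q.2, q.1) else (st.2.1 ++ ' ' :: q.2, st.2.2)
    if PySem.Chars.endswith q.2 [','] then (st.1, bs.1, bs.2)
    else (st.1 ++ [(bs.2, String.ofList (PySem.Chars.strip bs.1))], [], bs.2)

-- intermediate fold (proof device): B's grouping expressed as a single fold over the cleaned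
-- list with state (out, group, start), bridging A's fold and B's slice-off loop
def stepB (st : List (Int × String) × List (List Char) × Int) (p : Int × List Char) :
    List (Int × String) × List (List Char) × Int :=
  let start := if st.2.1 = [] then p.1 else st.2.2
  let group := st.2.1 ++ [p.2]
  if PySem.Chars.endswith p.2 [','] then (st.1, group, start)
  else (st.1 ++ [(start, String.ofList (PySem.Chars.join [' '] group))], [], start)

-- the final flushes of A and of the intermediate fold
def finA (st : List (Int × String) × List Char × Int) : List (Int × String) :=
  if st.2.1 = [] then st.1
  else st.1 ++ [(st.2.2, String.ofList (PySem.Chars.strip st.2.1))]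

def finB (st : List (Int × String) × List (List Char) × Int) : List (Int × String) :=
  if st.2.1 = [] then st.1
  else st.1 ++ [(st.2.2, String.ofList (PySem.Chars.join [' '] st.2.1))]

-- a code as the cleaning pass produces it: non-empty, no space at either edge
def IsCode (c : List Char) : Prop :=
  c ≠ [] ∧ (∀ h, c.head? = some h → PySem.Chars.isspace h = false)
        ∧ (∀ h, c.getLast? = some h → PySem.Chars.isspace h = false)

theorem head?_dropWhile_not {p : Char → Bool} :
    ∀ (l : List Char) (h : Char), (List.dropWhile p l).head? = some h → p h = false := by
  intro l
  induction l with
  | nil => intro h hh; simp at hh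
  | cons a t ih =>
    intro h hh
    rw [List.dropWhile_cons] at hh
    by_cases hp : p a = true
    · simp [hp] at hh; exact ih h hh
    · simp [hp] at hh
      rw [← hh]
      exact (Bool.not_eq_true _).mp hp

theorem getLast?_dropWhile {p : Char → Bool} (l : List Char)
    (h : List.dropWhile p l ≠ []) : (List.dropWhile p l).getLast? = l.getLast? := by
  obtain ⟨w, hw⟩ := List.dropWhile_suffix (l := l) p
  conv_rhs => rw [← hw]
  rw [List.getLast?_append]
  cases hl : (List.dropWhile p l).getLast? with
  | none => exact absurd (List.getLast?_eq_none_iff.mp hl) h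
  | some x => simp

theorem strip_isCode (r : List Char) (h : PySem.Chars.strip r ≠ []) :
    IsCode (PySem.Chars.strip r) := by
  have hdef : PySem.Chars.strip r
      = (List.dropWhile PySem.Chars.isspace
          (List.dropWhile PySem.Chars.isspace r).reverse).reverse := rfl
  have hvne : List.dropWhile PySem.Chars.isspace
      (List.dropWhile PySem.Chars.isspace r).reverse ≠ [] := by
    intro h0
    exact h (by rw [hdef, h0]; rfl)
  refine ⟨h, ?_, ?_⟩
  · intro x hx
    rw [hdef, List.head?_reverse, getLast?_dropWhile _ hvne, List.getLast?_reverse] at hx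
    exact head?_dropWhile_not _ x hx
  · intro x hx
    rw [hdef, List.getLast?_reverse] at hx
    exact head?_dropWhile_not _ x hx

theorem isCode_strip_eq {c : List Char} (h : IsCode c) : PySem.Chars.strip c = c := by
  obtain ⟨hne, hh, hl⟩ := h
  have h1 : PySem.Chars.lstrip c = c := by
    cases c with
    | nil => rfl
    | cons a t =>
      have := hh a rfl
      simp [PySem.Chars.lstrip, this]
  have h2 : PySem.Chars.rstrip c = c := by
    cases hr : c.reverse with
    | nil => simp only [List.reverse_eq_nil_iff] at hr; exact absurd hr hne
    | cons a t =>
      have ha : c.getLast? = some a := by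
        rw [← List.head?_reverse, hr]; rfl
      have hsp := hl a ha
      have : List.dropWhile PySem.Chars.isspace c.reverse = c.reverse := by
        rw [hr, List.dropWhile_cons]; simp [hsp]
      simp [PySem.Chars.rstrip, this]
  show PySem.Chars.rstrip (PySem.Chars.lstrip c) = c
  rw [h1, h2]

theorem isCode_append_space {a c : List Char} (ha : IsCode a) (hc : IsCode c) :
    IsCode (a ++ ' ' :: c) := by
  obtain ⟨hane, hah, _⟩ := ha
  obtain ⟨hcne, _, hcl⟩ := hc
  refine ⟨by simp, ?_, ?_⟩
  · intro x hx
    rw [List.head?_append] at hx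
    cases h : a.head? with
    | none => exact absurd (List.head?_eq_none_iff.mp h) hane
    | some y => rw [h] at hx; simp at hx; rw [← hx]; exact hah y h
  · intro x hx
    rw [List.getLast?_append] at hx
    have hlc : (' ' :: c).getLast? = c.getLast? := by
      cases c with
      | nil => exact absurd rfl hcne
      | cons b t => simp
    rw [hlc] at hx
    cases h : c.getLast? with
    | none => exact absurd (List.getLast?_eq_none_iff.mp h) hcne
    | some y => rw [h] at hx; simp at hx; rw [← hx]; exact hcl y h

theorem join_append_single (c : List Char) :
    ∀ (g : List (List Char)), g ≠ [] →
      PySem.Chars.join [' '] (g ++ [c]) = PySem.Chars.join [' '] g ++ ' ' :: c := by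
  intro g
  induction g with
  | nil => intro h; exact absurd rfl h
  | cons x t ih =>
    intro _
    cases t with
    | nil => simp [PySem.Chars.join_cons_cons, PySem.Chars.join_singleton]
    | cons y s =>
      have hrec := ih (by simp)
      simp only [List.cons_append, PySem.Chars.join_cons_cons]
      rw [List.cons_append] at hrec
      rw [hrec]
      simp

theorem cleanEntry?_isCode {p q : Int × List Char} (h : cleanEntry? p = some q) :
    IsCode q.2 := by
  unfold cleanEntry? at h
  by_cases hc : pyCleanCode p.2 = []
  · simp [hc] at h
  · simp only [hc, if_false] at h
    injection h with h
    rw [← h]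
    exact strip_isCode _ (by simpa [pyCleanCode] using hc)

theorem foldA_filter :
    ∀ (l : List (Int × List Char)) (st : List (Int × String) × List Char × Int),
      l.foldl stepA st = (l.filterMap cleanEntry?).foldl stepA' st := by
  intro l
  induction l with
  | nil => intro st; rfl
  | cons p t ih =>
    intro st
    by_cases hc : pyCleanCode p.2 = []
    · have h1 : cleanEntry? p = none := by simp [cleanEntry?, hc]
      have h2 : stepA st p = st := by simp [stepA, hc]
      simp only [List.foldl_cons, List.filterMap_cons, h1, h2, ih]
    · have h1 : cleanEntry? p = some (p.1, pyCleanCode p.2) := by simp [cleanEntry?, hc]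
      have h2 : stepA st p = stepA' st (p.1, pyCleanCode p.2) := rfl
      simp only [List.foldl_cons, List.filterMap_cons, h1, h2, ih]

-- invariant: A's fold with buf = " ".join(group) tracks the intermediate fold with group
theorem main_fold :
    ∀ (l : List (Int × List Char)) (out : List (Int × String))
      (group : List (List Char)) (start : Int),
      (∀ p ∈ l, IsCode p.2) →
      (group = [] ∨ IsCode (PySem.Chars.join [' '] group)) →
      finA (l.foldl stepA' (out, PySem.Chars.join [' '] group, start)) =
      finB (l.foldl stepB (out, group, start)) := by
  intro l
  induction l with
  | nil =>
    intro out group start _ hinv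
    rcases hinv with h | h
    · simp [h, PySem.Chars.join_nil, finA, finB]
    · have hne := h.1
      have hgne : group ≠ [] := by rintro rfl; exact hne (PySem.Chars.join_nil _)
      simp only [List.foldl_nil, finA, finB]
      rw [if_neg hne, if_neg hgne, isCode_strip_eq h]
  | cons p t ih =>
    intro out group start hl hinv
    have hp : IsCode p.2 := hl p (by simp)
    have hl' : ∀ q ∈ t, IsCode q.2 := fun q hq => hl q (by simp [hq])
    have hpne : p.2 ≠ [] := hp.1
    simp only [List.foldl_cons]
    rcases hinv with hg | hj
    · subst hg
      rw [PySem.Chars.join_nil]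
      have hA : stepA' (out, [], start) p =
          if PySem.Chars.endswith p.2 [','] then (out, p.2, p.1)
          else (out ++ [(p.1, String.ofList (PySem.Chars.strip p.2))], [], p.1) := by
        simp [stepA', hpne]
      have hB : stepB (out, [], start) p =
          if PySem.Chars.endswith p.2 [','] then (out, [p.2], p.1)
          else (out ++ [(p.1, String.ofList (PySem.Chars.join [' '] [p.2]))], [], p.1) := by
        simp [stepB]
      by_cases he : PySem.Chars.endswith p.2 [','] = true
      · rw [hA, hB, if_pos he, if_pos he]
        have hrec := ih out [p.2] p.1 hl'
          (Or.inr (by rw [PySem.Chars.join_singleton]; exact hp))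
        rw [PySem.Chars.join_singleton] at hrec
        exact hrec
      · rw [hA, hB, if_neg he, if_neg he, isCode_strip_eq hp, PySem.Chars.join_singleton]
        have hrec := ih (out ++ [(p.1, String.ofList p.2)]) [] p.1 hl' (Or.inl rfl)
        rw [PySem.Chars.join_nil] at hrec
        exact hrec
    · have hgne : group ≠ [] := fun h0 => hj.1 (by rw [h0]; rfl)
      have hjne : PySem.Chars.join [' '] group ≠ [] := hj.1
      have hstep := join_append_single p.2 group hgne
      have hnew : IsCode (PySem.Chars.join [' '] group ++ ' ' :: p.2) :=
        isCode_append_space hj hp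
      have hA : stepA' (out, PySem.Chars.join [' '] group, start) p =
          if PySem.Chars.endswith p.2 [','] then
            (out, PySem.Chars.join [' '] group ++ ' ' :: p.2, start)
          else (out ++ [(start, String.ofList
                  (PySem.Chars.strip (PySem.Chars.join [' '] group ++ ' ' :: p.2)))],
                [], start) := by
        simp [stepA', hpne, hjne]
      have hB : stepB (out, group, start) p =
          if PySem.Chars.endswith p.2 [','] then (out, group ++ [p.2], start)
          else (out ++ [(start, String.ofList (PySem.Chars.join [' '] (group ++ [p.2])))],
                [], start) := by
        simp [stepB, hgne]
      by_cases he : PySem.Chars.endswith p.2 [','] = true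
      · rw [hA, hB, if_pos he, if_pos he]
        have hrec := ih out (group ++ [p.2]) start hl' (Or.inr (by rw [hstep]; exact hnew))
        rw [hstep] at hrec
        exact hrec
      · rw [hA, hB, if_neg he, if_neg he, isCode_strip_eq hnew, ← hstep]
        have hrec := ih (out ++ [(start, String.ofList (PySem.Chars.join [' '] (group ++ [p.2])))])
          [] start hl' (Or.inl rfl)
        rw [PySem.Chars.join_nil] at hrec
        exact hrec

-- recursive length of the leading comma-continuation run (proof-side view of groupLenGo)
def run : List (Int × List Char) → Nat
  | p :: q :: t => if PySem.Chars.endswith p.2 [','] = true then run (q :: t) + 1 else 0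
  | _ => 0

theorem run_short (l : List (Int × List Char)) (h : l.length ≤ 1) : run l = 0 := by
  match l with
  | [] => rfl
  | [a] => rfl
  | a :: b :: t => simp at h

theorem groupLenGo_eq_run :
    ∀ (k : Nat) (l : List (Int × List Char)) (n : Nat), 1 ≤ n → l.length - n ≤ k →
      groupLenGo l n = n + run (l.drop (n - 1)) := by
  intro k
  induction k with
  | zero =>
    intro l n h1 hk
    rw [groupLenGo]
    rw [if_neg (by omega : ¬(n < l.length ∧ _))]
    have hlen : (l.drop (n - 1)).length ≤ 1 := by
      rw [List.length_drop]; omega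
    rw [run_short _ hlen]
    omega
  | succ k ih =>
    intro l n h1 hk
    rw [groupLenGo]
    by_cases h : n < l.length ∧ PySem.Chars.endswith ((l.getD (n - 1) (0, ([] : List Char))).2) [','] = true
    · rw [if_pos h]
      obtain ⟨hlt, hcomma⟩ := h
      rw [ih l (n + 1) (by omega) (by omega)]
      have hsimp : n + 1 - 1 = n := by omega
      rw [hsimp]
      have h1' : n - 1 < l.length := by omega
      have hdrop : l.drop (n - 1) = l[n - 1] :: l.drop n := by
        cases n with
        | zero => omega
        | succ m =>
          simp only [Nat.add_sub_cancel]
          exact List.drop_eq_getElem_cons (by omega)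
      have hget : l.getD (n - 1) (0, ([] : List Char)) = l[n - 1] := List.getD_eq_getElem l _ h1'
      rw [hget] at hcomma
      have hrest : l.drop n ≠ [] := by
        intro h0
        have hh := List.length_drop (l := l) (i := n)
        rw [h0] at hh
        simp at hh
        omega
      obtain ⟨b, rest, hbr⟩ := List.exists_cons_of_ne_nil hrest
      rw [hdrop, hbr]
      have hrun : run (l[n - 1] :: b :: rest) = run (b :: rest) + 1 := by
        simp only [run]
        rw [if_pos hcomma]
      rw [hrun]
      omega
    · rw [if_neg h]
      by_cases hn : n < l.length
      · have hcomma : ¬ PySem.Chars.endswith ((l.getD (n - 1) (0, ([] : List Char))).2) [','] = true := by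
          intro hc; exact h ⟨hn, hc⟩
        have h1' : n - 1 < l.length := by omega
        have hdrop : l.drop (n - 1) = l[n - 1] :: l.drop n := by
          cases n with
          | zero => omega
          | succ m =>
            simp only [Nat.add_sub_cancel]
            exact List.drop_eq_getElem_cons (by omega)
        have hget : l.getD (n - 1) (0, ([] : List Char)) = l[n - 1] := List.getD_eq_getElem l _ h1'
        rw [hget] at hcomma
        cases hd : l.drop n with
        | nil =>
          rw [hdrop, hd, run_short _ (by simp)]
          omega
        | cons b rest =>
          rw [hdrop, hd]
          have hrun : run (l[n - 1] :: b :: rest) = 0 := by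
            simp only [run]
            rw [if_neg hcomma]
          rw [hrun]
          omega
      · have hlen : (l.drop (n - 1)).length ≤ 1 := by
          rw [List.length_drop]; omega
        rw [run_short _ hlen]
        omega

theorem groupLenGo_one (l : List (Int × List Char)) : groupLenGo l 1 = 1 + run l := by
  have := groupLenGo_eq_run l.length l 1 le_rfl (by omega)
  simpa using this

-- decompose a non-empty list at its leading comma-continuation run
theorem run_split :
    ∀ (l : List (Int × List Char)), l ≠ [] →
      ∃ cs q t, l = cs ++ q :: t ∧ cs.length = run l ∧
        (∀ p ∈ cs, PySem.Chars.endswith p.2 [','] = true) ∧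
        (t = [] ∨ PySem.Chars.endswith q.2 [','] = false) := by
  intro l
  induction l with
  | nil => intro h; exact absurd rfl h
  | cons p t ih =>
    intro _
    cases t with
    | nil =>
      exact ⟨[], p, [], by simp, by simp [run], by simp, Or.inl rfl⟩
    | cons r t0 =>
      by_cases hc : PySem.Chars.endswith p.2 [','] = true
      · obtain ⟨cs', q, t', hl, hlen, hcs, hq⟩ := ih (by simp)
        refine ⟨p :: cs', q, t', by rw [List.cons_append, ← hl], ?_, ?_, hq⟩
        · show cs'.length + 1 = run (p :: r :: t0)
          show cs'.length + 1 = if PySem.Chars.endswith p.2 [','] = true then run (r :: t0) + 1 else 0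
          rw [if_pos hc, ← hlen]
        · intro x hx
          rcases List.mem_cons.mp hx with h | h
          · rw [h]; exact hc
          · exact hcs x h
      · refine ⟨[], p, r :: t0, by simp, ?_, by simp, Or.inr (by simpa using hc)⟩
        show 0 = if PySem.Chars.endswith p.2 [','] = true then run (r :: t0) + 1 else 0
        rw [if_neg hc]

-- folding stepB over an all-comma run just appends the codes to the group
theorem commafold :
    ∀ (cs : List (Int × List Char)) (out : List (Int × String)) (g : List (List Char)) (s : Int),
      (∀ p ∈ cs, PySem.Chars.endswith p.2 [','] = true) → g ≠ [] →
      cs.foldl stepB (out, g, s) = (out, g ++ cs.map Prod.snd, s) := by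
  intro cs
  induction cs with
  | nil => intro out g s _ _; simp
  | cons p cs' ih =>
    intro out g s hall hg
    have hp : PySem.Chars.endswith p.2 [','] = true := hall p (by simp)
    have hstep : stepB (out, g, s) p = (out, g ++ [p.2], s) := by
      simp [stepB, hg, hp]
    simp only [List.foldl_cons, hstep]
    rw [ih out (g ++ [p.2]) s (fun x hx => hall x (by simp [hx])) (by simp)]
    simp

-- the intermediate fold (flushed) equals B's slice-off loop
theorem B_main :
    ∀ (k : Nat) (l : List (Int × List Char)), l.length ≤ k →
      ∀ (out : List (Int × String)) (s : Int),
      finB (l.foldl stepB (out, [], s)) = out ++ loopB l := by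
  intro k
  induction k with
  | zero =>
    intro l hk out s
    have : l = [] := List.length_eq_zero_iff.mp (by omega)
    subst this
    simp [finB, loopB]
  | succ k ih =>
    intro l hk out s
    cases hl0 : l with
    | nil => simp [finB, loopB]
    | cons p t =>
    subst hl0
    obtain ⟨cs, q, t', hl, hlen, hcs, hq⟩ := run_split (p :: t) (by simp)
    have hn : groupLenGo (p :: t) 1 = cs.length + 1 := by
      rw [groupLenGo_one, ← hlen]; omega
    have hassoc : p :: t = (cs ++ [q]) ++ t' := by rw [hl]; simp
    have htake : (p :: t).take (cs.length + 1) = cs ++ [q] := by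
      rw [hassoc]
      exact List.take_left' (by simp)
    have hdrop : (p :: t).drop (cs.length + 1) = t' := by
      rw [hassoc]
      exact List.drop_left' (by simp)
    have hloop : loopB (p :: t) =
        (p.1, String.ofList (PySem.Chars.join [' '] ((cs ++ [q]).map Prod.snd))) :: loopB t' := by
      rw [loopB]
      simp only [hn, htake, hdrop]
    cases cs with
    | nil =>
      -- the group is a single terminator line q  (p = q, t = t')
      have hpq : p = q ∧ t = t' := by
        simp at hl
        exact ⟨hl.1, hl.2⟩
      obtain ⟨hp, ht⟩ := hpq
      subst hp; subst ht
      by_cases hcm : PySem.Chars.endswith p.2 [','] = true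
      · have ht' : t = [] := by
          rcases hq with h | h
          · exact h
          · rw [hcm] at h; simp at h
        subst ht'
        simp only [List.foldl_cons, List.foldl_nil]
        have : stepB (out, [], s) p = (out, [p.2], p.1) := by simp [stepB, hcm]
        rw [this, hloop]
        simp [finB, loopB]
      · simp only [List.foldl_cons]
        have : stepB (out, [], s) p =
            (out ++ [(p.1, String.ofList (PySem.Chars.join [' '] [p.2]))], [], p.1) := by
          simp [stepB, hcm]
        rw [this, ih t (by simp at hk; omega) _ p.1, hloop]
        simp
    | cons c0 cs' =>
      have hp0 : p = c0 := by
        rw [List.cons_append] at hl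
        exact (List.cons_eq_cons.mp hl).1
      have htl : t = cs' ++ q :: t' := by
        rw [List.cons_append] at hl
        exact (List.cons_eq_cons.mp hl).2
      subst hp0
      have hcsfold : (cs' ++ q :: t').foldl stepB (out, [p.2], p.1) =
          (q :: t').foldl stepB (out, (p :: cs').map Prod.snd, p.1) := by
        rw [List.foldl_append]
        rw [commafold cs' out [p.2] p.1 (fun x hx => hcs x (by simp [hx])) (by simp)]
        simp
      have hstep0 : stepB (out, [], s) p = (out, [p.2], p.1) := by
        simp [stepB, hcs p (by simp)]
      by_cases hcm : PySem.Chars.endswith q.2 [','] = true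
      · have ht' : t' = [] := by
          rcases hq with h | h
          · exact h
          · rw [hcm] at h; simp at h
        subst ht'
        have hstepq : stepB (out, (p :: cs').map Prod.snd, p.1) q =
            (out, (p :: cs').map Prod.snd ++ [q.2], p.1) := by
          simp [stepB, hcm]
        rw [htl] at hloop ⊢
        simp only [List.foldl_cons, hstep0]
        rw [hcsfold]
        simp only [List.foldl_cons, List.foldl_nil, hstepq]
        rw [hloop]
        simp [finB, loopB]
      · have hstepq : stepB (out, (p :: cs').map Prod.snd, p.1) q =
            (out ++ [(p.1, String.ofList
              (PySem.Chars.join [' '] ((p :: cs').map Prod.snd ++ [q.2])))], [], p.1) := by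
          simp [stepB, hcm]
        rw [htl] at hloop ⊢
        simp only [List.foldl_cons, hstep0]
        rw [hcsfold]
        simp only [List.foldl_cons, hstepq]
        have hlt : t'.length ≤ k := by
          have : t.length = cs'.length + 1 + t'.length := by rw [htl]; simp; omega
          simp at hk
          omega
        rw [ih t' hlt _ p.1, hloop]
        simp

-- ===== VERDICT (by name: the statement is the Claim_ definition above) =====
theorem logical_lines_py_spec : Claim_equal_logical_lines_py := by
  intro script _
  show logical_lines_py script = logical_lines_py_alt script
  have key : ∀ (L : List (Int × List Char)),
      finA (L.foldl stepA ([], [], 0)) = loopB (L.filterMap cleanEntry?) := by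
    intro L
    have hcodes : ∀ p ∈ L.filterMap cleanEntry?, IsCode p.2 := fun p hp => by
      obtain ⟨a, _, h⟩ := List.mem_filterMap.mp hp
      exact cleanEntry?_isCode h
    rw [foldA_filter]
    have hm := main_fold (L.filterMap cleanEntry?) [] [] 0 hcodes (Or.inl rfl)
    rw [PySem.Chars.join_nil] at hm
    rw [hm]
    have hb := B_main (L.filterMap cleanEntry?).length _ le_rfl [] 0
    simpa using hb
  exact key (PySem.List.enumerate
    (PySem.Chars.splitlines (if script = "" then "" else script).toList) 1)
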